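-- pv_equiv track=rewrite | github.com/vitorcezli/parser | cky.py | getPossibilitiesWithout
-- ===== SOURCE A (Python) =====
-- import itertools
--
-- def removeDuplicates(listVariable):
-- 	listVariable.sort()
-- 	return list(k for k,_ in itertools.groupby(listVariable))
--
-- def getPossibilitiesWithout(rule, nonterminal):
-- 	possibilities = []
--
-- 	for index in range(len(rule)):
-- 		if rule[index] == nonterminal:
-- 			listCopy = rule[:]
-- 			del listCopy[index]
-- 			if len(listCopy) >= 1:
-- 				possibilities.append(listCopy)
-- 				possibilities += getPossibilitiesWithout(listCopy, nonterminal)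
-- 	return removeDuplicates(possibilities)
-- ===== SOURCE B (Python) =====
-- def getPossibilitiesWithout(rule, nonterminal):
--     if nonterminal not in rule:   # no occurrence: nothing can be deleted
--         return []
--     # one forward pass: 'variants' holds every list obtainable from the prefix
--     # read so far by deleting any subset of the nonterminal's occurrences
--     variants = [[]]
--     for x in rule:
--         if x == nonterminal:
--             variants = [v + [x] for v in variants] + variants
--         else:
--             for v in variants:
--                 v.append(x)
--     results = {tuple(v) for v in variants if v and v != rule}
--     return sorted(list(t) for t in results)
-- ===== Notes on version B (the rewrite author's own statement) =====
-- stated objective: alternative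
-- what changed: A recursively explores every order of deleting the nonterminal's occurrences one at a time, re-sorting and deduplicating at every recursion level; B makes one forward pass over the rule maintaining every deletion variant of the prefix read so far (each deletion subset enumerated once), filters out the empty and unchanged lists, and sorts the resulting set once.
import Mathlib
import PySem

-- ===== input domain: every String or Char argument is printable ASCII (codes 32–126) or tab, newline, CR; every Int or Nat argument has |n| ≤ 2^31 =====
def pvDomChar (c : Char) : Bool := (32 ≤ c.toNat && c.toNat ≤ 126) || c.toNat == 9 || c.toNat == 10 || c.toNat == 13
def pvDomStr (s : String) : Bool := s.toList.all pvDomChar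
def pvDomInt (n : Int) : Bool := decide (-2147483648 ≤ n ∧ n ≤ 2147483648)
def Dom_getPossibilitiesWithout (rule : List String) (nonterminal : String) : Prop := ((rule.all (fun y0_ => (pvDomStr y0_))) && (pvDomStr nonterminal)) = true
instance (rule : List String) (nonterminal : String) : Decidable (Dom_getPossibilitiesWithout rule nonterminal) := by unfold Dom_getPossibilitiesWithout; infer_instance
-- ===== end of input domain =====

-- B replaces A's recursive exploration of all one-at-a-time deletion orders (re-sorting and
-- deduplicating at every level) by one forward pass that enumerates each deletion subset once,
-- then a single sort (objective: alternative).

-- ===== PORT A =====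
-- groupby keys of an already sorted list = adjacent dedup ('list(k for k,_ in itertools.groupby(l))'); exact on any list
def dedupAdjA : List (List String) → List (List String)
  | [] => []
  | [a] => [a]
  | a :: b :: t => if a = b then dedupAdjA (b :: t) else a :: dedupAdjA (b :: t)

-- removeDuplicates: listVariable.sort() then groupby keys (mutation is of a local list only)
def removeDuplicatesA (listVariable : List (List String)) : List (List String) :=
  dedupAdjA (PySem.List.sorted listVariable (fun x => x))

-- fuel = rule.length suffices: each recursive call is on a list shorter by one
def gpwAux : Nat → List String → String → List (List String)
  | 0, _, _ => []
  | fuel+1, rule, nonterminal =>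
      removeDuplicatesA ((List.range rule.length).foldl (fun possibilities index =>
        if rule.getD index "" = nonterminal then
          let listCopy := rule.eraseIdx index   -- rule[:] then del listCopy[index]
          if 1 ≤ listCopy.length then
            (possibilities ++ [listCopy]) ++ gpwAux fuel listCopy nonterminal
          else possibilities
        else possibilities) [])

def getPossibilitiesWithout (rule : List String) (nonterminal : String) : List (List String) :=
  gpwAux rule.length rule nonterminal

-- ===== PORT B =====
-- one forward pass: 'variants' holds every list obtainable from the prefix read so far
-- by deleting any subset of the nonterminal's occurrences (the in-place 'v.append(x)'
-- loop of Source B is the map over 'variants')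
def variantsB (nonterminal : String) (rule : List String) : List (List String) :=
  rule.foldl (fun variants x =>
    if x = nonterminal then variants.map (fun v => v ++ [x]) ++ variants
    else variants.map (fun v => v ++ [x])) [[]]

def getPossibilitiesWithout_alt (rule : List String) (nonterminal : String) : List (List String) :=
  if nonterminal ∉ rule then []   -- no occurrence: nothing can be deleted
  else
    PySem.List.sorted
      (PySem.Set.ofList ((variantsB nonterminal rule).filter (fun v => v ≠ [] ∧ v ≠ rule)))
      (fun x => x)

-- ===== PRECONDITION & SPEC =====
def Spec_getPossibilitiesWithout (rule : List String) (nonterminal : String) (out : List (List String)) : Prop := out = getPossibilitiesWithout_alt rule nonterminal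
instance (rule : List String) (nonterminal : String) (out : List (List String)) : Decidable (Spec_getPossibilitiesWithout rule nonterminal out) := by unfold Spec_getPossibilitiesWithout; infer_instance

-- ===== CLAIM (what is proved, stated in full; the proofs are below) =====
def Claim_equal_getPossibilitiesWithout : Prop := ∀ (rule : List String) (nonterminal : String), Dom_getPossibilitiesWithout rule nonterminal → Spec_getPossibilitiesWithout rule nonterminal (getPossibilitiesWithout rule nonterminal)

-- ===== LEMMAS AND PROOFS =====

-- 'DelNT nt v r': v is obtained from r by deleting some (possibly zero) occurrences of nt
inductive DelNT (nt : String) : List String → List String → Prop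
  | nil : DelNT nt [] []
  | keep {l r : List String} (a : String) : DelNT nt l r → DelNT nt (a :: l) (a :: r)
  | drop {l r : List String} : DelNT nt l r → DelNT nt l (nt :: r)

theorem delNT_length {nt : String} {l r : List String} (h : DelNT nt l r) : l.length ≤ r.length := by
  induction h with
  | nil => simp
  | keep a _ ih => simpa using ih
  | drop _ ih => simp; omega

theorem delNT_nil_left {nt : String} {l : List String} (h : DelNT nt l []) : l = [] := by
  cases h; rfl

theorem delNT_refl (nt : String) (l : List String) : DelNT nt l l := by
  induction l with
  | nil => exact DelNT.nil
  | cons a t ih => exact DelNT.keep a ih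

theorem delNT_trans {nt : String} {a b c : List String}
    (h1 : DelNT nt a b) (h2 : DelNT nt b c) : DelNT nt a c := by
  induction h2 generalizing a with
  | nil => exact h1
  | keep s _ ih =>
      cases h1 with
      | keep _ h' => exact DelNT.keep _ (ih h')
      | drop h' => exact DelNT.drop (ih h')
  | drop _ ih => exact DelNT.drop (ih h1)

theorem delNT_eraseIdx {nt : String} {rule : List String} {i : Nat}
    (hi : i < rule.length) (hv : rule[i] = nt) : DelNT nt (rule.eraseIdx i) rule := by
  induction rule generalizing i with
  | nil => simp at hi
  | cons a t ih =>
      cases i with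
      | zero => simp at hv; subst hv; simpa using DelNT.drop (delNT_refl _ t)
      | succ j =>
          simp at hi hv
          simpa using DelNT.keep a (ih hi hv)

-- first deleted occurrence: a strict deletion factors through one eraseIdx at an occurrence
theorem delNT_exists_eraseIdx {nt : String} {x rule : List String}
    (h : DelNT nt x rule) (hne : x ≠ rule) :
    ∃ i, ∃ hi : i < rule.length, rule[i] = nt ∧ DelNT nt x (rule.eraseIdx i) := by
  induction h with
  | nil => exact absurd rfl hne
  | @keep l r a h ih =>
      have hlr : l ≠ r := fun he => hne (by rw [he])
      obtain ⟨i, hi, hv, hd⟩ := ih hlr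
      refine ⟨i + 1, by simp; omega, ?_, ?_⟩
      · simpa using hv
      · simpa using DelNT.keep a hd
  | @drop l r h _ =>
      refine ⟨0, by simp, by simp, by simpa using h⟩

theorem delNT_mem_of_ne {nt : String} {x rule : List String}
    (h : DelNT nt x rule) (hne : x ≠ rule) : nt ∈ rule := by
  induction h with
  | nil => exact absurd rfl hne
  | keep a h' ih =>
      refine List.mem_cons_of_mem _ (ih fun he => hne ?_)
      rw [he]
  | drop _ _ => exact List.mem_cons_self

-- membership through the dedup/sort of A
theorem mem_dedupAdjA {x : List String} : ∀ {l : List (List String)}, x ∈ dedupAdjA l ↔ x ∈ l := by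
  intro l
  induction l with
  | nil => simp [dedupAdjA]
  | cons a t ih =>
      cases t with
      | nil => simp [dedupAdjA]
      | cons b t' =>
          by_cases hab : a = b
          · subst hab; simp [dedupAdjA, ih]
          · simp [dedupAdjA, hab, ih]

theorem mem_removeDuplicatesA {x : List String} {l : List (List String)} :
    x ∈ removeDuplicatesA l ↔ x ∈ l := by
  unfold removeDuplicatesA
  rw [mem_dedupAdjA, PySem.List.mem_sorted]

-- membership in a guarded-append foldl
theorem mem_foldl_if_append {α β : Type} (p : β → Prop) [DecidablePred p] (h : β → List α) :
    ∀ (xs : List β) (acc : List α) (x : α),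
      (x ∈ xs.foldl (fun a i => if p i then a ++ h i else a) acc ↔
        x ∈ acc ∨ ∃ i ∈ xs, p i ∧ x ∈ h i) := by
  intro xs
  induction xs with
  | nil => simp
  | cons y ys ih =>
      intro acc x
      by_cases hy : p y
      · simp [hy, ih]; tauto
      · simp [hy, ih]

-- the loop body of A, as one guarded append
theorem gpwAux_body_eq (fuel : Nat) (rule : List String) (nonterminal : String) :
    (fun (possibilities : List (List String)) (index : Nat) =>
        if rule.getD index "" = nonterminal then
          let listCopy := rule.eraseIdx index
          if 1 ≤ listCopy.length then
            (possibilities ++ [listCopy]) ++ gpwAux fuel listCopy nonterminal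
          else possibilities
        else possibilities)
      = (fun possibilities index =>
          if (rule.getD index "" = nonterminal ∧ 1 ≤ (rule.eraseIdx index).length) then
            possibilities ++ ([rule.eraseIdx index] ++ gpwAux fuel (rule.eraseIdx index) nonterminal)
          else possibilities) := by
  funext poss index
  by_cases h1 : rule.getD index "" = nonterminal
  · by_cases h2 : 1 ≤ (rule.eraseIdx index).length
    · rw [if_pos h1, if_pos (show _ ∧ _ from ⟨h1, h2⟩)]
      simp [h2]
    · rw [if_pos h1, if_neg (by tauto)]
      simp [h2]
  · rw [if_neg h1, if_neg (by tauto)]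

-- characterization of A's result set
theorem mem_gpwAux {nt : String} :
    ∀ (fuel : Nat) (rule : List String), rule.length ≤ fuel → ∀ x : List String,
      (x ∈ gpwAux fuel rule nt ↔ (DelNT nt x rule ∧ x ≠ rule ∧ x ≠ [])) := by
  intro fuel
  induction fuel with
  | zero =>
      intro rule hlen x
      have : rule = [] := by cases rule <;> simp_all
      subst this
      simp only [gpwAux, List.not_mem_nil, false_iff]
      rintro ⟨hd, hne, hnil⟩
      exact hnil (delNT_nil_left hd)
  | succ fuel ih =>
      intro rule hlen x
      show x ∈ removeDuplicatesA _ ↔ _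
      rw [mem_removeDuplicatesA, gpwAux_body_eq,
        mem_foldl_if_append (fun index => rule.getD index "" = nt ∧ 1 ≤ (rule.eraseIdx index).length)
          (fun index => [rule.eraseIdx index] ++ gpwAux fuel (rule.eraseIdx index) nt)]
      simp only [List.not_mem_nil, false_or, List.mem_range, List.mem_append, List.mem_singleton]
      constructor
      · rintro ⟨i, hi, ⟨hv, hlc⟩, hx⟩
        have hv' : rule[i] = nt := by rwa [List.getD_eq_getElem _ _ hi] at hv
        have hlen' : (rule.eraseIdx i).length ≤ fuel := by
          rw [List.length_eraseIdx_of_lt hi]; omega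
        have hdel : DelNT nt (rule.eraseIdx i) rule := delNT_eraseIdx hi hv'
        rcases hx with hx | hx
        · subst hx
          refine ⟨hdel, ?_, ?_⟩
          · intro he
            have := congrArg List.length he
            rw [List.length_eraseIdx_of_lt hi] at this; omega
          · intro he; rw [he] at hlc; simp at hlc
        · obtain ⟨hd2, hne2, hnil2⟩ := (ih _ hlen' x).1 hx
          refine ⟨delNT_trans hd2 hdel, ?_, hnil2⟩
          intro he
          have l1 := delNT_length hd2
          rw [he] at l1
          rw [List.length_eraseIdx_of_lt hi] at l1; omega
      · rintro ⟨hd, hne, hnil⟩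
        obtain ⟨i, hi, hv, hdi⟩ := delNT_exists_eraseIdx hd hne
        have hx1 : 1 ≤ x.length := by cases x with | nil => exact absurd rfl hnil | cons a t => simp
        have hlc : 1 ≤ (rule.eraseIdx i).length := le_trans hx1 (delNT_length hdi)
        have hlen' : (rule.eraseIdx i).length ≤ fuel := by
          rw [List.length_eraseIdx_of_lt hi]; omega
        refine ⟨i, hi, ⟨by rwa [List.getD_eq_getElem _ _ hi], hlc⟩, ?_⟩
        by_cases hxe : x = rule.eraseIdx i
        · exact Or.inl hxe
        · exact Or.inr ((ih _ hlen' x).2 ⟨hdi, hxe, hnil⟩)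

-- snoc characterization of deletions
theorem delNT_snoc_iff {nt x : String} :
    ∀ (p v : List String), (DelNT nt v (p ++ [x]) ↔
      (∃ w, DelNT nt w p ∧ v = w ++ [x]) ∨ (x = nt ∧ DelNT nt v p)) := by
  intro p
  induction p with
  | nil =>
      intro v
      constructor
      · intro h
        cases h with
        | keep a h' =>
            cases h'
            exact Or.inl ⟨[], DelNT.nil, rfl⟩
        | drop h' =>
            cases h'
            exact Or.inr ⟨rfl, DelNT.nil⟩
      · rintro (⟨w, hw, rfl⟩ | ⟨rfl, hv⟩)
        · cases hw; exact DelNT.keep x DelNT.nil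
        · cases hv; exact DelNT.drop DelNT.nil
  | cons a p' ih =>
      intro v
      constructor
      · intro h
        cases h with
        | keep _ h' =>
            rcases (ih _).1 h' with ⟨w, hw, rfl⟩ | ⟨hx, hl⟩
            · exact Or.inl ⟨a :: w, DelNT.keep a hw, rfl⟩
            · exact Or.inr ⟨hx, DelNT.keep a hl⟩
        | drop h' =>
            rcases (ih _).1 h' with ⟨w, hw, rfl⟩ | ⟨hx, hl⟩
            · exact Or.inl ⟨w, DelNT.drop hw, rfl⟩
            · exact Or.inr ⟨hx, DelNT.drop hl⟩
      · rintro (⟨w, hw, rfl⟩ | ⟨hx, hv⟩)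
        · cases hw with
          | keep _ hw' => exact DelNT.keep _ ((ih _).2 (Or.inl ⟨_, hw', rfl⟩))
          | drop hw' => exact DelNT.drop ((ih _).2 (Or.inl ⟨_, hw', rfl⟩))
        · cases hv with
          | keep _ hv' => exact DelNT.keep _ ((ih _).2 (Or.inr ⟨hx, hv'⟩))
          | drop hv' => exact DelNT.drop ((ih _).2 (Or.inr ⟨hx, hv'⟩))

-- characterization of B's variants
theorem mem_variantsB {nt : String} :
    ∀ (rule v : List String), (v ∈ variantsB nt rule ↔ DelNT nt v rule) := by
  intro rule
  induction rule using List.reverseRecOn with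
  | nil =>
      intro v
      simp only [variantsB, List.foldl_nil, List.mem_singleton]
      constructor
      · rintro rfl; exact DelNT.nil
      · exact delNT_nil_left
  | append_singleton p x ih =>
      intro v
      have hfold : variantsB nt (p ++ [x])
          = (if x = nt then (variantsB nt p).map (fun v => v ++ [x]) ++ variantsB nt p
             else (variantsB nt p).map (fun v => v ++ [x])) := by
        simp [variantsB, List.foldl_append]
      rw [hfold, delNT_snoc_iff]
      by_cases hx : x = nt
      · simp only [if_pos hx, List.mem_append, List.mem_map]
        constructor
        · rintro (⟨w, hw, rfl⟩ | hv)
          · exact Or.inl ⟨w, (ih w).1 hw, rfl⟩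
          · exact Or.inr ⟨hx, (ih v).1 hv⟩
        · rintro (⟨w, hw, rfl⟩ | ⟨_, hv⟩)
          · exact Or.inl ⟨w, (ih w).2 hw, rfl⟩
          · exact Or.inr ((ih v).2 hv)
      · simp only [if_neg hx, List.mem_map]
        constructor
        · rintro ⟨w, hw, rfl⟩
          exact Or.inl ⟨w, (ih w).1 hw, rfl⟩
        · rintro (⟨w, hw, rfl⟩ | ⟨hx', _⟩)
          · exact ⟨w, (ih w).2 hw, rfl⟩
          · exact absurd hx' hx

-- strict sortedness of A's final list
theorem pairwise_lt_dedupAdjA :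
    ∀ {l : List (List String)}, l.Pairwise (· ≤ ·) → (dedupAdjA l).Pairwise (· < ·) := by
  intro l
  induction l with
  | nil => intro _; simp [dedupAdjA]
  | cons a t ih =>
      intro hp
      cases t with
      | nil => simp [dedupAdjA]
      | cons b t' =>
          have hp' : (b :: t').Pairwise (· ≤ ·) := hp.of_cons
          by_cases hab : a = b
          · simpa [dedupAdjA, hab] using ih hp'
          · rw [show dedupAdjA (a :: b :: t') = a :: dedupAdjA (b :: t') by simp [dedupAdjA, hab]]
            refine List.Pairwise.cons ?_ (ih hp')
            intro y hy
            have hyb : y ∈ b :: t' := mem_dedupAdjA.1 hy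
            have hab' : a ≤ b := (List.pairwise_cons.1 hp).1 b (by simp)
            have hby : b ≤ y := by
              rcases List.mem_cons.1 hyb with rfl | hyt'
              · exact le_refl y
              · exact (List.pairwise_cons.1 hp').1 y hyt'
            exact lt_of_lt_of_le (lt_of_le_of_ne hab' hab) hby

-- the PySem order lemmas, restated at the instances the ports elaborate with
theorem sortedA_pairwise_le (xs : List (List String)) :
    (PySem.List.sorted xs (fun x => x)).Pairwise (· ≤ ·) := by
  have he : (PySem.List.sorted xs (fun x => x) : List (List String))
      = @PySem.List.sorted (List String) (List String) List.instLinearOrder.toLT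
          LinearOrder.toDecidableLT xs (fun x => x) false := by congr
  rw [he]
  exact PySem.List.sorted_pairwise xs (fun x => x)

theorem sortedB_pairwise_lt (xs : List (List String)) :
    (PySem.List.sorted (PySem.Set.ofList xs) (fun x => x)).Pairwise (· < ·) := by
  have he : (PySem.List.sorted (PySem.Set.ofList xs) (fun x => x) : List (List String))
      = @PySem.List.sorted (List String) (List String) List.instLinearOrder.toLT
          LinearOrder.toDecidableLT (PySem.Set.ofList xs) (fun x => x) false := by congr
  rw [he]
  exact PySem.List.sorted_ofList_pairwise_lt xs

-- two strictly increasing lists with the same members are equal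
theorem eq_of_pairwise_lt_of_mem_iff {l₁ l₂ : List (List String)}
    (h₁ : l₁.Pairwise (· < ·)) (h₂ : l₂.Pairwise (· < ·))
    (hm : ∀ x, x ∈ l₁ ↔ x ∈ l₂) : l₁ = l₂ := by
  have n₁ : l₁.Nodup := h₁.imp (fun h => ne_of_lt h)
  have n₂ : l₂.Nodup := h₂.imp (fun h => ne_of_lt h)
  have hperm : l₁.Perm l₂ := (List.perm_ext_iff_of_nodup n₁ n₂).2 hm
  exact List.Perm.eq_of_pairwise
    (fun a b _ _ hab hba => le_antisymm (le_of_lt hab) (le_of_lt hba)) h₁ h₂ hperm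

-- ===== VERDICT (by name: the statement is the Claim_ definition above) =====
theorem getPossibilitiesWithout_spec : Claim_equal_getPossibilitiesWithout := by
  intro rule nonterminal _
  show getPossibilitiesWithout rule nonterminal = getPossibilitiesWithout_alt rule nonterminal
  unfold getPossibilitiesWithout getPossibilitiesWithout_alt
  by_cases hm : nonterminal ∈ rule
  · rw [if_neg (by simpa using hm)]
    have hA : ∀ fuel rule', (gpwAux fuel rule' nonterminal).Pairwise (· < ·) := by
      intro fuel rule'
      cases fuel with
      | zero => simp [gpwAux]
      | succ f =>
          show (removeDuplicatesA _).Pairwise (· < ·)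
          exact pairwise_lt_dedupAdjA (sortedA_pairwise_le _)
    refine eq_of_pairwise_lt_of_mem_iff (hA rule.length rule) (sortedB_pairwise_lt _) ?_
    intro x
    rw [mem_gpwAux rule.length rule le_rfl x]
    rw [PySem.List.mem_sorted, PySem.Set.mem_ofList, List.mem_filter]
    simp only [mem_variantsB, decide_eq_true_eq]
    constructor
    · rintro ⟨hd, hne, hnil⟩; exact ⟨hd, hnil, hne⟩
    · rintro ⟨hd, hnil, hne⟩; exact ⟨hd, hne, hnil⟩
  · rw [if_pos (by simpa using hm)]
    rw [List.eq_nil_iff_forall_not_mem]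
    intro x hx
    obtain ⟨hd, hne, _⟩ := (mem_gpwAux rule.length rule le_rfl x).1 hx
    exact hm (delNT_mem_of_ne hd hne)
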